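-- pv_equiv track=rewrite | github.com/MrBrantCode/unitest_baseline | mut_generate/mist_train_taco/taco_12456/solution.py | generate_binary_numbers
-- ===== SOURCE A (Python) =====
-- from queue import Queue
--
-- def generate_binary_numbers(N):
--     queue = Queue(maxsize=0)
--     queue.put("1")
--     count = 0
--     ans = []
--     while count < N:
--         curr = queue.get()
--         ans.append(curr)
--         count += 1
--         queue.put(curr + "0")
--         queue.put(curr + "1")
--     return ans
-- ===== SOURCE B (Python) =====
-- def generate_binary_numbers(N):
--     # Direct closed form: the BFS queue emits binary representations of 1..N.
--     return [format(i, 'b') for i in range(1, N + 1)]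
-- ===== Notes on version B (the rewrite author's own statement) =====
-- stated objective: faster
-- what changed: Replaces the lock-guarded Queue BFS loop with a direct list comprehension emitting format(i,'b') for i in 1..N (closed form of the BFS order).
import Mathlib
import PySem

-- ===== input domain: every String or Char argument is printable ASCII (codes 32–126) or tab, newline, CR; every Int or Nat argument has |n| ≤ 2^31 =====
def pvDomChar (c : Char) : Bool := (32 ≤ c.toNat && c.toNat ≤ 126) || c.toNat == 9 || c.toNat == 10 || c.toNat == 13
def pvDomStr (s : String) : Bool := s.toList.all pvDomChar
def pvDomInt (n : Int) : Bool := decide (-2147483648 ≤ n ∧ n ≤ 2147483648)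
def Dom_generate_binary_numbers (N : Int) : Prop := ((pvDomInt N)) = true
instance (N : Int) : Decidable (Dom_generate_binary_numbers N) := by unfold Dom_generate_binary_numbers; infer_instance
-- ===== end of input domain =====

-- B replaces A's Queue-based BFS loop with a direct comprehension format(i,'b') for i in 1..N.

-- ===== PORT A =====
-- A's while loop: queue starts as ["1"]; each iteration pops the front, appends it to ans,
-- and pushes front+"0", front+"1".  The empty-queue branch is unreachable from the initial
-- call (the queue grows by one each step); Python's Queue.get would block there.
def pvALoop (queue : List String) (count N : Int) (ans : List String) : List String :=
  if count < N then
    match queue with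
    | [] => ans
    | curr :: rest => pvALoop (rest ++ [curr ++ "0", curr ++ "1"]) (count + 1) N (ans ++ [curr])
  else ans
termination_by (N - count).toNat
decreasing_by omega

def generate_binary_numbers (N : Int) : List String :=
  pvALoop ["1"] 0 N []

-- ===== PORT B =====
-- port of Python's format(i, 'b'): binary digits of i, exact for every i ≥ 1
-- (only i ≥ 1 is reached, since the comprehension ranges over 1..N).
def pvBin (n : Nat) : String :=
  if _h : n = 0 then "" else pvBin (n / 2) ++ (if n % 2 = 1 then "1" else "0")
termination_by n
decreasing_by omega

def generate_binary_numbers_alt (N : Int) : List String :=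
  (PySem.List.pyRange 1 (N + 1) 1).map (fun i => pvBin i.toNat)

-- ===== PRECONDITION & SPEC =====
def Spec_generate_binary_numbers (N : Int) (out : List String) : Prop := out = generate_binary_numbers_alt N
instance (N : Int) (out : List String) : Decidable (Spec_generate_binary_numbers N out) := by unfold Spec_generate_binary_numbers; infer_instance

-- ===== CLAIM (what is proved, stated in full; the proofs are below) =====
def Claim_equal_generate_binary_numbers : Prop := ∀ (N : Int), Dom_generate_binary_numbers N → Spec_generate_binary_numbers N (generate_binary_numbers N)

-- ===== LEMMAS AND PROOFS =====

theorem pvBin_def (n : Nat) (h : n ≠ 0) :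
    pvBin n = pvBin (n / 2) ++ (if n % 2 = 1 then "1" else "0") := by
  rw [pvBin]; simp [h]

theorem pvBin_even (m : Nat) : pvBin (2 * (m + 1)) = pvBin (m + 1) ++ "0" := by
  rw [pvBin_def (2 * (m + 1)) (by omega)]
  have h1 : 2 * (m + 1) / 2 = m + 1 := by omega
  have h2 : 2 * (m + 1) % 2 = 0 := by omega
  rw [h1, h2]; simp

theorem pvBin_odd (m : Nat) : pvBin (2 * (m + 1) + 1) = pvBin (m + 1) ++ "1" := by
  rw [pvBin_def (2 * (m + 1) + 1) (by omega)]
  have h1 : (2 * (m + 1) + 1) / 2 = m + 1 := by omega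
  have h2 : (2 * (m + 1) + 1) % 2 = 1 := by omega
  rw [h1, h2]; simp

-- Loop invariant: after c iterations the queue holds pvBin of c+1 .. 2c+1 (in order)
-- and ans holds pvBin of 1 .. c; running k more iterations yields pvBin of 1 .. c+k.
theorem pvALoop_inv (k : Nat) : ∀ (c : Nat),
    pvALoop ((List.range' (c + 1) (c + 1)).map pvBin) (c : Int) ((c : Int) + (k : Int))
      ((List.range' 1 c).map pvBin)
    = (List.range' 1 (c + k)).map pvBin := by
  induction k with
  | zero =>
    intro c
    rw [pvALoop.eq_def]
    simp
  | succ k ih =>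
    intro c
    rw [pvALoop.eq_def]
    have hlt : (c : Int) < (c : Int) + ((k : Nat) + 1 : Nat) := by push_cast; omega
    rw [if_pos hlt]
    have hq : (List.range' (c + 1) (c + 1)).map pvBin
        = pvBin (c + 1) :: (List.range' (c + 2) c).map pvBin := by
      rw [List.range'_succ]; simp
    rw [hq]
    show pvALoop ((List.range' (c + 2) c).map pvBin ++ [pvBin (c + 1) ++ "0", pvBin (c + 1) ++ "1"])
        ((c : Int) + 1) ((c : Int) + ((k : Nat) + 1 : Nat)) ((List.range' 1 c).map pvBin ++ [pvBin (c + 1)])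
      = (List.range' 1 (c + (k + 1))).map pvBin
    have hq2 : (List.range' (c + 2) c).map pvBin ++ [pvBin (c + 1) ++ "0", pvBin (c + 1) ++ "1"]
        = (List.range' (c + 2) (c + 2)).map pvBin := by
      have e1 : List.range' (c + 2) (c + 2) = List.range' (c + 2) (c + 1) ++ [(c + 2) + (c + 1)] := by
        simpa using List.range'_concat (s := c + 2) (n := c + 1) (step := 1)
      have e2 : List.range' (c + 2) (c + 1) = List.range' (c + 2) c ++ [(c + 2) + c] := by
        simpa using List.range'_concat (s := c + 2) (n := c) (step := 1)
      rw [e1, e2]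
      have hz : (c + 2) + c = 2 * (c + 1) := by omega
      have ho : (c + 2) + (c + 1) = 2 * (c + 1) + 1 := by omega
      simp [hz, ho, pvBin_even, pvBin_odd]
    have ha : (List.range' 1 c).map pvBin ++ [pvBin (c + 1)]
        = (List.range' 1 (c + 1)).map pvBin := by
      have e : List.range' 1 (c + 1) = List.range' 1 c ++ [1 + c] := by
        simpa using List.range'_concat (s := 1) (n := c) (step := 1)
      rw [e]
      have : 1 + c = c + 1 := by omega
      simp [this]
    rw [hq2, ha]
    have hc1 : ((c : Int) + 1) = (((c + 1 : Nat) : Int)) := by push_cast; ring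
    have hN : (c : Int) + ((k : Nat) + 1 : Nat) = (((c + 1 : Nat) : Int)) + (k : Int) := by
      push_cast; ring
    rw [hc1, hN, ih (c + 1)]
    have : c + 1 + k = c + (k + 1) := by omega
    rw [this]

theorem pvBin_one : pvBin 1 = "1" := by
  rw [pvBin_def 1 (by omega)]
  rw [pvBin]
  simp

-- ===== VERDICT (by name: the statement is the Claim_ definition above) =====
theorem generate_binary_numbers_spec : Claim_equal_generate_binary_numbers := by
  intro N _
  unfold Spec_generate_binary_numbers generate_binary_numbers generate_binary_numbers_alt
  by_cases hN : N ≤ 0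
  · rw [pvALoop.eq_def]
    rw [if_neg (by omega)]
    rw [PySem.List.pyRange_one_eq_nil (by omega)]
    simp
  · rw [not_le] at hN
    set n := N.toNat with hn
    have hNn : N = (n : Int) := by omega
    have hA : pvALoop ["1"] 0 N [] = (List.range' 1 n).map pvBin := by
      have h0 : (["1"] : List String) = (List.range' (0 + 1) (0 + 1)).map pvBin := by
        simp [List.range'_succ, pvBin_one]
      have h1 : ([] : List String) = (List.range' 1 0).map pvBin := by simp
      rw [h0, h1, hNn]
      have := pvALoop_inv n 0
      simpa using this
    rw [hA, hNn]
    rw [PySem.List.pyRange_one]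
    have hlen : ((n : Int) + 1 - 1).toNat = n := by omega
    rw [hlen, List.range'_eq_map_range, List.map_map, List.map_map]
    refine List.map_congr_left (fun k _ => ?_)
    show pvBin (1 + k) = pvBin ((1 + (k : Int)).toNat)
    have hk : ((1 : Int) + (k : Int)).toNat = 1 + k := by omega
    rw [hk]
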